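-- pv_equiv track=rewrite | github.com/876YassineZaoui/CN | CN_project/CN_source_code/CN_project.py | coder_miller
-- ===== SOURCE A (Python) =====
-- def coder_miller(sequence):
--     encoded = []
--     last_level = 1
--     for i, bit in enumerate(sequence):
--         if bit == '1':
--             if i % 2 == 0:
--                 encoded.append(last_level)
--             else:
--                 last_level = -last_level
--                 encoded.append(last_level)
--         else:
--             encoded.append(encoded[-1] if encoded else last_level)
--     return encoded
-- ===== SOURCE B (Python) =====
-- def coder_miller(sequence):
--     # map each position to a sign factor, then take the running product
--     factors = [(-1 if i % 2 == 1 and bit == '1' else 1) for i, bit in enumerate(sequence)]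
--     out = []
--     level = 1
--     for f in factors:
--         level *= f
--         out.append(level)
--     return out
-- ===== Notes on version B (the rewrite author's own statement) =====
-- stated objective: alternative
-- what changed: Replaces A's branch-heavy stateful pass that re-reads encoded[-1] with a map-then-prefix-scan: a comprehension of per-position sign factors followed by a running product.
import Mathlib
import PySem

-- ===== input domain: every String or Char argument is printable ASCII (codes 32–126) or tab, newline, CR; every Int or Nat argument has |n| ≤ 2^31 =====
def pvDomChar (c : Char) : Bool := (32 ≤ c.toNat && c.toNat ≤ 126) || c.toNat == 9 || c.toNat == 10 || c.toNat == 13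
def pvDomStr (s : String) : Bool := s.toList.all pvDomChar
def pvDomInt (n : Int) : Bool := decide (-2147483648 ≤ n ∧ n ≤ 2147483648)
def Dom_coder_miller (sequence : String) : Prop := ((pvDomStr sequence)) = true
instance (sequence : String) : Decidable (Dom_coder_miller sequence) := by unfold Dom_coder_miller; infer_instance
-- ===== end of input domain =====

-- B replaces A's branch-heavy stateful pass (which re-reads encoded[-1]) with a map of
-- per-position sign factors followed by a running-product scan; same O(n) cost (alternative).


-- ===== PORT A =====
-- one step of A's loop body: state = (encoded, last_level)
def coderMillerStepA (st : List Int × Int) (p : Int × Char) : List Int × Int :=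
  if p.2 = '1' then
    if p.1 % 2 = 0 then (st.1 ++ [st.2], st.2)
    else (st.1 ++ [-st.2], -st.2)
  else
    (st.1 ++ [match st.1.getLast? with | some x => x | none => st.2], st.2)

def coder_miller (sequence : String) : List Int :=
  ((PySem.List.enumerate sequence.toList).foldl coderMillerStepA ([], 1)).1

-- ===== PORT B =====
-- one step of B's scan: state = (out, level)
def coderMillerStepB (st : List Int × Int) (f : Int) : List Int × Int :=
  (st.1 ++ [st.2 * f], st.2 * f)

def coder_miller_alt (sequence : String) : List Int :=
  let factors := (PySem.List.enumerate sequence.toList).map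
    (fun p => if p.1 % 2 = 1 ∧ p.2 = '1' then (-1 : Int) else 1)
  (factors.foldl coderMillerStepB ([], 1)).1

-- ===== PRECONDITION & SPEC =====
def Spec_coder_miller (sequence : String) (out : List Int) : Prop := out = coder_miller_alt sequence
instance (sequence : String) (out : List Int) : Decidable (Spec_coder_miller sequence out) := by unfold Spec_coder_miller; infer_instance

-- ===== CLAIM (what is proved, stated in full; the proofs are below) =====
def Claim_equal_coder_miller : Prop := ∀ (sequence : String), Dom_coder_miller sequence → Spec_coder_miller sequence (coder_miller sequence)

-- ===== LEMMAS AND PROOFS =====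

-- invariant: whenever encoded is nonempty its last element is last_level, the two folds agree
theorem coder_miller_fold_eq (l : List (Int × Char)) (enc : List Int) (last : Int)
    (h : enc = [] ∨ enc.getLast? = some last) :
    l.foldl coderMillerStepA (enc, last)
      = (l.map (fun p => if p.1 % 2 = 1 ∧ p.2 = '1' then (-1 : Int) else 1)).foldl
          coderMillerStepB (enc, last) := by
  induction l generalizing enc last with
  | nil => rfl
  | cons p t ih =>
    obtain ⟨i, c⟩ := p
    simp only [List.foldl_cons, List.map_cons]
    by_cases hc : c = '1'
    · by_cases hi : i % 2 = 0
      · have hA : coderMillerStepA (enc, last) (i, c) = (enc ++ [last], last) := by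
          simp [coderMillerStepA, hc, hi]
        have hB : coderMillerStepB (enc, last)
            (if (i, c).1 % 2 = 1 ∧ (i, c).2 = '1' then (-1 : Int) else 1) = (enc ++ [last], last) := by
          have : ¬ (i % 2 = 1 ∧ c = '1') := by intro h; omega
          simp [coderMillerStepB, this]
        rw [hA, hB]
        exact ih (enc ++ [last]) last (Or.inr (by simp))
      · have hA : coderMillerStepA (enc, last) (i, c) = (enc ++ [-last], -last) := by
          simp [coderMillerStepA, hc, hi]
        have hB : coderMillerStepB (enc, last)
            (if (i, c).1 % 2 = 1 ∧ (i, c).2 = '1' then (-1 : Int) else 1) = (enc ++ [-last], -last) := by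
          have : i % 2 = 1 ∧ c = '1' := ⟨by omega, hc⟩
          simp [coderMillerStepB, this]
        rw [hA, hB]
        exact ih (enc ++ [-last]) (-last) (Or.inr (by simp))
    · have hlast : (match enc.getLast? with | some x => x | none => last) = last := by
        rcases h with h | h <;> simp [h]
      have hA : coderMillerStepA (enc, last) (i, c) = (enc ++ [last], last) := by
        simp [coderMillerStepA, hc, hlast]
      have hB : coderMillerStepB (enc, last)
          (if (i, c).1 % 2 = 1 ∧ (i, c).2 = '1' then (-1 : Int) else 1) = (enc ++ [last], last) := by
        have : ¬ (i % 2 = 1 ∧ c = '1') := fun h => hc h.2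
        simp [coderMillerStepB, this]
      rw [hA, hB]
      exact ih (enc ++ [last]) last (Or.inr (by simp))

-- ===== VERDICT (by name: the statement is the Claim_ definition above) =====
theorem coder_miller_spec : Claim_equal_coder_miller := by
  intro s _
  unfold Spec_coder_miller coder_miller coder_miller_alt
  rw [coder_miller_fold_eq _ _ _ (Or.inl rfl)]
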